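-- pv_equiv track=rewrite | github.com/sakimsan/multi-zone-mpc-master-thesis | bes-rules/bes_rules/rule_extraction/innovization.py | get_feature_combinations
-- ===== SOURCE A (Python) =====
-- from itertools import combinations
-- from typing import List, Dict, Any, Type, Union
--
-- def get_feature_combinations(
--         features_to_consider: List[str],
--         n_features: int = None,
-- ):
--     n_max = len(features_to_consider)
--     if n_features is None:
--         n_features = n_max
--     elif n_features > n_max:
--         raise ValueError(
--             f"Maximal number of provided features is "
--             f"{n_max}, can't combine more than that."
--         )
--     all_feature_names = []
--     for i in range(1, n_features + 1):
--         for combination in combinations(features_to_consider, i):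
--             all_feature_names.append(list(combination))
--     return all_feature_names
-- ===== SOURCE B (Python) =====
-- def get_feature_combinations(
--         features_to_consider,
--         n_features=None,
-- ):
--     n_max = len(features_to_consider)
--     if n_features is None:
--         n_features = n_max
--     elif n_features > n_max:
--         raise ValueError(
--             f"Maximal number of provided features is "
--             f"{n_max}, can't combine more than that."
--         )
--     # One include-first DFS over the feature list enumerates ALL subsets in
--     # lexicographic index order; bucketing them by size and concatenating the
--     # buckets 1..n_features reproduces combinations' order per size.
--     buckets = [[] for _ in range(n_max + 1)]
--
--     def dfs(i, chosen):
--         if i == n_max: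
--             buckets[len(chosen)].append(chosen)
--             return
--         dfs(i + 1, chosen + [features_to_consider[i]])
--         dfs(i + 1, chosen)
--
--     dfs(0, [])
--     return [c for k in range(1, n_features + 1) for c in buckets[k]]
-- ===== Notes on version B (the rewrite author's own statement) =====
-- stated objective: alternative
-- what changed: Instead of calling itertools.combinations per size, B runs a single include-first DFS that enumerates the whole powerset once in lexicographic index order, buckets subsets by size, and concatenates buckets 1..n_features.
import Mathlib
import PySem

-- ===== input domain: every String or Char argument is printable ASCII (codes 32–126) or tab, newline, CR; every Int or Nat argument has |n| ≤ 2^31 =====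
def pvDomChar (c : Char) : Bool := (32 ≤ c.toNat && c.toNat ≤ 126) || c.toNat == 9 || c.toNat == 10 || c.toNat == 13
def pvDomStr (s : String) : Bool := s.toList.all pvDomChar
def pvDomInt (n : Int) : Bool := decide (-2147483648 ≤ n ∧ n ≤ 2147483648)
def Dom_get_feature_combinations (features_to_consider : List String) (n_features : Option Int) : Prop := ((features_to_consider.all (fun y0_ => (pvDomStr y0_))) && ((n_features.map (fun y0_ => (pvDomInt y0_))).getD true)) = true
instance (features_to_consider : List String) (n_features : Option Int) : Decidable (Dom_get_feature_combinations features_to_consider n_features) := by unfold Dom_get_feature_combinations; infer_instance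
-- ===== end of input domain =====

-- B replaces the per-size itertools.combinations calls with ONE include-first powerset DFS,
-- bucketing subsets by size and concatenating buckets 1..n_features (alternative algorithm).

-- ===== PORT A =====
-- itertools.combinations(xs, k) in positional-lexicographic order, as A's library call produces it
def pyCombinations (k : Nat) (xs : List String) : List (List String) :=
  match k, xs with
  | 0, _ => [[]]
  | _ + 1, [] => []
  | k + 1, x :: rest => (pyCombinations k rest).map (fun c => x :: c) ++ pyCombinations (k + 1) rest

def get_feature_combinations (features_to_consider : List String) (n_features : Option Int) : List (List String) :=
  let n_max : Int := features_to_consider.length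
  let n : Int := match n_features with | none => n_max | some m => m
  -- for i in range(1, n_features + 1): for combination in combinations(...,i): append(list(combination))
  -- (every i drawn from the range is ≥ 1, so i.toNat is exact)
  (PySem.List.pyRange 1 (n + 1) 1).foldl
    (fun acc i => acc ++ pyCombinations i.toNat features_to_consider) []

-- ===== PORT B =====
-- dfs(i, chosen): include-first DFS over the remaining features, emitting each completed subset
def dfsB (xs : List String) (chosen : List String) : List (List String) :=
  match xs with
  | [] => [chosen]
  | x :: rest => dfsB rest (chosen ++ [x]) ++ dfsB rest chosen

def get_feature_combinations_alt (features_to_consider : List String) (n_features : Option Int) : List (List String) :=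
  let n_max : Int := features_to_consider.length
  let n : Int := match n_features with | none => n_max | some m => m
  -- buckets[k] in append order = the emitted subsets of size k, in emission order
  let subsets := dfsB features_to_consider []
  -- [c for k in range(1, n_features + 1) for c in buckets[k]]
  (PySem.List.pyRange 1 (n + 1) 1).flatMap
    (fun k => subsets.filter (fun c => ((c.length : Int) == k)))

-- ===== PRECONDITION & SPEC =====
-- Pre_ excludes exactly the inputs where A raises ValueError (n_features > len(features_to_consider)).
def Pre_get_feature_combinations (features_to_consider : List String) (n_features : Option Int) : Prop :=
  n_features.getD features_to_consider.length ≤ (features_to_consider.length : Int)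
instance (features_to_consider : List String) (n_features : Option Int) : Decidable (Pre_get_feature_combinations features_to_consider n_features) := by unfold Pre_get_feature_combinations; infer_instance

def pvWitness_get_feature_combinations : List String × Option Int := (["a", "b"], some 2)

def Spec_get_feature_combinations (features_to_consider : List String) (n_features : Option Int) (out : List (List String)) : Prop := out = get_feature_combinations_alt features_to_consider n_features
instance (features_to_consider : List String) (n_features : Option Int) (out : List (List String)) : Decidable (Spec_get_feature_combinations features_to_consider n_features out) := by unfold Spec_get_feature_combinations; infer_instance

-- ===== CLAIM (what is proved, stated in full; the proofs are below) =====
def Claim_equal_get_feature_combinations : Prop := ∀ (features_to_consider : List String) (n_features : Option Int), Dom_get_feature_combinations features_to_consider n_features → Pre_get_feature_combinations features_to_consider n_features → Spec_get_feature_combinations features_to_consider n_features (get_feature_combinations features_to_consider n_features)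

-- ===== LEMMAS AND PROOFS =====
theorem dfsB_eq_map (xs pre : List String) :
    dfsB xs pre = (dfsB xs []).map (fun c => pre ++ c) := by
  induction xs generalizing pre with
  | nil => simp [dfsB]
  | cons x rest ih =>
    simp only [dfsB, List.nil_append]
    rw [ih (pre ++ [x]), ih pre, ih [x], List.map_append, List.map_map]
    simp [Function.comp]

-- the powerset emission sequence, restricted to subsets of size k, IS combinations(xs, k)
theorem dfsB_filter_len (xs : List String) (k : Nat) :
    (dfsB xs []).filter (fun c => c.length == k) = pyCombinations k xs := by
  induction xs generalizing k with
  | nil =>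
    cases k with
    | zero => simp [dfsB, pyCombinations]
    | succ k => simp [dfsB, pyCombinations]
  | cons x rest ih =>
    simp only [dfsB, List.nil_append]
    rw [dfsB_eq_map rest [x]]
    cases k with
    | zero =>
      simp only [List.filter_append, List.filter_map]
      have h0 : (dfsB rest []).filter (fun c => c.length == 0) = pyCombinations 0 rest := ih 0
      simp only [pyCombinations] at h0 ⊢
      simp [Function.comp, h0]
    | succ k =>
      simp only [List.filter_append, List.filter_map, pyCombinations]
      rw [← ih k, ← ih (k + 1)]
      congr 2
      apply List.filter_congr
      intro c _
      simp only [Function.comp_apply, List.length_cons]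
      by_cases h : c.length = k
      · simp [h]
      · have h1 : c.length + 1 ≠ k + 1 := by omega
        simp [h, h1]

theorem filter_int_eq (xs : List String) (k : Int) (hk : 1 ≤ k) :
    (dfsB xs []).filter (fun c => ((c.length : Int) == k)) = pyCombinations k.toNat xs := by
  rw [← dfsB_filter_len xs k.toNat]
  congr 1
  funext c
  by_cases h : (c.length : Int) = k
  · have h' : c.length = k.toNat := by omega
    simp [h, h']
    omega
  · have h' : c.length ≠ k.toNat := by omega
    simp [h, h']

-- ===== VERDICT (by name: the statement is the Claim_ definition above) =====
theorem get_feature_combinations_spec : Claim_equal_get_feature_combinations := by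
  intro xs nf _ _
  unfold Spec_get_feature_combinations get_feature_combinations get_feature_combinations_alt
  rw [PySem.List.foldl_append_eq_flatMap]
  simp only [List.nil_append]
  apply List.flatMap_congr
  intro i hi
  rw [PySem.List.mem_pyRange_one] at hi
  exact (filter_int_eq xs i hi.1).symm
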